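-- pv_equiv track=rewrite | github.com/SDSMT-Capstone-Spice-GUI-Team/Spice-GUI | app/simulation/netlist_parser.py | _tokenize_spice_line
-- ===== SOURCE A (Python) =====
-- def _tokenize_spice_line(line):
--     """Tokenize a SPICE line, keeping parenthesized expressions as single tokens.
--
--     E.g. 'Vin 1 0 SIN(0 5 1k)' -> ['Vin', '1', '0', 'SIN(0 5 1k)']
--     """
--     tokens = []
--     current = ""
--     paren_depth = 0
--
--     for ch in line:
--         if ch == "(":
--             paren_depth += 1
--             current += ch
--         elif ch == ")":
--             paren_depth -= 1
--             current += ch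
--         elif ch in (" ", "\t") and paren_depth == 0:
--             if current:
--                 tokens.append(current)
--                 current = ""
--         else:
--             current += ch
--
--     if current:
--         tokens.append(current)
--
--     return tokens
-- ===== SOURCE B (Python) =====
-- def _split_ws(line):
--     """Split line into maximal runs of whitespace (' '/'\t') and non-whitespace."""
--     pieces = []
--     i = 0
--     n = len(line)
--     while i < n:
--         j = i
--         if line[i] in (" ", "\t"):
--             while j < n and line[j] in (" ", "\t"):
--                 j += 1
--         else:
--             while j < n and line[j] not in (" ", "\t"):
--                 j += 1
--         pieces.append(line[i:j])
--         i = j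
--     return pieces
--
--
-- def _tokenize_spice_line(line):
--     """Split into word/separator runs, then merge runs by paren balance."""
--     tokens = []
--     acc = ""
--     bal = 0
--     for piece in _split_ws(line):
--         if piece[0] in (" ", "\t"):
--             if bal == 0:
--                 if acc:
--                     tokens.append(acc)
--                     acc = ""
--             else:
--                 acc += piece
--         else:
--             acc += piece
--             bal += piece.count("(") - piece.count(")")
--     if acc:
--         tokens.append(acc)
--     return tokens
-- ===== Notes on version B (the rewrite author's own statement) =====
-- stated objective: alternative
-- what changed: B is a two-pass split-then-merge: it first cuts the line into maximal whitespace/non-whitespace runs and then folds over those runs merging them by parenthesis balance, instead of A's single character-by-character accumulation scan.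
import Mathlib
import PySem

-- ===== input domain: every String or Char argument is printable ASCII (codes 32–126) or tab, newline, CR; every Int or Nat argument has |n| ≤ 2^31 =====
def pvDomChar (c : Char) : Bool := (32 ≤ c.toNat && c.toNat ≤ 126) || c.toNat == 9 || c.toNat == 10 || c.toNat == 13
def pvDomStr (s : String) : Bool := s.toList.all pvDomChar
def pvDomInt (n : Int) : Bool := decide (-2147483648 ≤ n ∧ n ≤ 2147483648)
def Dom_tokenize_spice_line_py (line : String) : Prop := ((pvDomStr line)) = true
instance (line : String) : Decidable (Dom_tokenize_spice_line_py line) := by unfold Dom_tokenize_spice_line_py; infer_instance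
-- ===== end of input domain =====

-- B replaces A's character-by-character scan with a two-pass split-into-runs-then-merge-by-paren-balance decomposition (alternative, same cost).

def pvIsWS (c : Char) : Bool := c = ' ' || c = '\t'

-- ===== PORT A =====
-- one step of A's for-loop over characters; state = (tokens, current, paren_depth)
def pvStepA (st : List (List Char) × List Char × Int) (ch : Char) : List (List Char) × List Char × Int :=
  let (tokens, current, depth) := st
  if ch = '(' then (tokens, current ++ [ch], depth + 1)
  else if ch = ')' then (tokens, current ++ [ch], depth - 1)
  else if pvIsWS ch && depth == 0 then
    if current ≠ [] then (tokens ++ [current], [], depth) else (tokens, current, depth)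
  else (tokens, current ++ [ch], depth)

def tokenize_spice_line_py (line : String) : List String :=
  let st := line.toList.foldl pvStepA ([], [], 0)
  (if st.2.1 ≠ [] then st.1 ++ [st.2.1] else st.1).map (fun t => String.ofList t)

-- ===== PORT B =====
-- _split_ws: cut into maximal whitespace / non-whitespace runs
def pvSplitWS : List Char → List (List Char)
  | [] => []
  | c :: cs =>
    if pvIsWS c then
      (c :: cs.takeWhile pvIsWS) :: pvSplitWS (cs.dropWhile pvIsWS)
    else
      (c :: cs.takeWhile (fun x => !pvIsWS x)) :: pvSplitWS (cs.dropWhile (fun x => !pvIsWS x))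
termination_by l => l.length
decreasing_by
  · have := List.length_dropWhile_le pvIsWS cs; simp; omega
  · have := List.length_dropWhile_le (fun x => !pvIsWS x) cs; simp; omega

-- piece.count("(") - piece.count(")")
def pvCountBal (p : List Char) : Int := (p.count '(' : Int) - (p.count ')' : Int)

-- one step of B's for-loop over pieces; state = (tokens, acc, bal)
def pvStepB (st : List (List Char) × List Char × Int) (p : List Char) : List (List Char) × List Char × Int :=
  let (tokens, acc, bal) := st
  if pvIsWS (p.headD '(') then
    if bal = 0 then
      if acc ≠ [] then (tokens ++ [acc], [], bal) else (tokens, acc, bal)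
    else (tokens, acc ++ p, bal)
  else (tokens, acc ++ p, bal + pvCountBal p)

def tokenize_spice_line_py_alt (line : String) : List String :=
  let st := (pvSplitWS line.toList).foldl pvStepB ([], [], 0)
  (if st.2.1 ≠ [] then st.1 ++ [st.2.1] else st.1).map (fun t => String.ofList t)

-- ===== PRECONDITION & SPEC =====
def Spec_tokenize_spice_line_py (line : String) (out : List String) : Prop := out = tokenize_spice_line_py_alt line
instance (line : String) (out : List String) : Decidable (Spec_tokenize_spice_line_py line out) := by unfold Spec_tokenize_spice_line_py; infer_instance

-- ===== CLAIM (what is proved, stated in full; the proofs are below) =====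
def Claim_equal_tokenize_spice_line_py : Prop := ∀ (line : String), Dom_tokenize_spice_line_py line → Spec_tokenize_spice_line_py line (tokenize_spice_line_py line)

-- ===== LEMMAS AND PROOFS =====

-- a whitespace char is neither paren
theorem pv_ws_ne_paren {c : Char} (h : pvIsWS c = true) : c ≠ '(' ∧ c ≠ ')' := by
  constructor <;> rintro rfl <;> simp [pvIsWS] at h

-- A over a non-whitespace run: append it all and shift depth by its balance
theorem pv_foldlA_word (w : List Char) (hw : ∀ c ∈ w, pvIsWS c = false) :
    ∀ t a b, List.foldl pvStepA (t, a, b) w = (t, a ++ w, b + pvCountBal w) := by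
  induction w with
  | nil => intro t a b; simp [pvCountBal]
  | cons c w ih =>
    intro t a b
    have hc : pvIsWS c = false := hw c (by simp)
    have hw' : ∀ x ∈ w, pvIsWS x = false := fun x hx => hw x (by simp [hx])
    by_cases h1 : c = '('
    · subst h1
      simp only [List.foldl_cons, pvStepA, ih hw']
      simp [pvCountBal]
      ring
    · by_cases h2 : c = ')'
      · subst h2
        simp only [List.foldl_cons, pvStepA, ih hw']
        simp [pvCountBal]
        ring
      · simp only [List.foldl_cons, pvStepA, if_neg h1, if_neg h2, hc]
        simp only [Bool.false_and, Bool.false_eq_true, if_false, ih hw']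
        simp [pvCountBal, h1, h2]

-- A over a whitespace run at nonzero depth: everything is appended, depth unchanged
theorem pv_foldlA_ws_ne (s : List Char) (hs : ∀ c ∈ s, pvIsWS c = true) :
    ∀ t a b, b ≠ 0 → List.foldl pvStepA (t, a, b) s = (t, a ++ s, b) := by
  induction s with
  | nil => intro t a b _; simp
  | cons c s ih =>
    intro t a b hb
    have hc : pvIsWS c = true := hs c (by simp)
    obtain ⟨h1, h2⟩ := pv_ws_ne_paren hc
    have hs' : ∀ x ∈ s, pvIsWS x = true := fun x hx => hs x (by simp [hx])
    simp only [List.foldl_cons, pvStepA, if_neg h1, if_neg h2, hc, Bool.true_and]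
    have : (b == 0) = false := by simp [hb]
    simp only [this, Bool.false_eq_true, if_false, ih hs' t (a ++ [c]) b hb]
    simp

-- A over a whitespace run at depth 0 with empty current: nothing happens
theorem pv_foldlA_ws_zero_nil (s : List Char) (hs : ∀ c ∈ s, pvIsWS c = true) (t : List (List Char)) :
    List.foldl pvStepA (t, [], 0) s = (t, [], 0) := by
  induction s with
  | nil => simp
  | cons c s ih =>
    have hc : pvIsWS c = true := hs c (by simp)
    obtain ⟨h1, h2⟩ := pv_ws_ne_paren hc
    simp only [List.foldl_cons, pvStepA, if_neg h1, if_neg h2, hc]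
    simpa using ih (fun x hx => hs x (by simp [hx]))

-- A over a whitespace run at depth 0: flush current (if nonempty)
theorem pv_foldlA_ws_zero (c : Char) (s : List Char) (hs : ∀ x ∈ c :: s, pvIsWS x = true)
    (t : List (List Char)) (a : List Char) :
    List.foldl pvStepA (t, a, 0) (c :: s) = ((if a ≠ [] then t ++ [a] else t), [], 0) := by
  have hc : pvIsWS c = true := hs c (by simp)
  obtain ⟨h1, h2⟩ := pv_ws_ne_paren hc
  have hs' : ∀ x ∈ s, pvIsWS x = true := fun x hx => hs x (by simp [hx])
  simp only [List.foldl_cons, pvStepA, if_neg h1, if_neg h2, hc, Bool.true_and]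
  by_cases ha : a = []
  · subst ha; simpa using pv_foldlA_ws_zero_nil s hs' t
  · simp only [ne_eq, ha, not_false_iff, if_true]
    simpa [ha] using pv_foldlA_ws_zero_nil s hs' (t ++ [a])

-- piece shape: nonempty and homogeneous
def pvGood (p : List Char) : Prop :=
  p ≠ [] ∧ ((∀ c ∈ p, pvIsWS c = true) ∨ (∀ c ∈ p, pvIsWS c = false))

theorem pv_splitWS_good (l : List Char) : ∀ p ∈ pvSplitWS l, pvGood p := by
  induction l using pvSplitWS.induct with
  | case1 => simp [pvSplitWS]
  | case2 c cs h ih =>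
    intro p hp
    rw [pvSplitWS, if_pos h] at hp
    rcases List.mem_cons.mp hp with hp | hp
    · subst hp
      refine ⟨by simp, Or.inl ?_⟩
      intro x hx
      rcases List.mem_cons.mp hx with hx | hx
      · exact hx ▸ h
      · exact List.mem_takeWhile_imp hx
    · exact ih p hp
  | case3 c cs h ih =>
    intro p hp
    rw [pvSplitWS, if_neg h] at hp
    rcases List.mem_cons.mp hp with hp | hp
    · subst hp
      refine ⟨by simp, Or.inr ?_⟩
      intro x hx
      rcases List.mem_cons.mp hx with hx | hx
      · subst hx; simpa using h
      · simpa using List.mem_takeWhile_imp hx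
    · exact ih p hp

theorem pv_splitWS_flatten (l : List Char) : (pvSplitWS l).flatten = l := by
  induction l using pvSplitWS.induct with
  | case1 => simp [pvSplitWS]
  | case2 c cs h ih =>
    rw [pvSplitWS, if_pos h]
    simp [ih, List.takeWhile_append_dropWhile]
  | case3 c cs h ih =>
    rw [pvSplitWS, if_neg h]
    simp [ih, List.takeWhile_append_dropWhile]

-- main invariant: A's char fold over the flattened pieces equals B's piece fold
theorem pv_fold_eq (ps : List (List Char)) (hps : ∀ p ∈ ps, pvGood p) :
    ∀ t a b, List.foldl pvStepA (t, a, b) ps.flatten = List.foldl pvStepB (t, a, b) ps := by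
  induction ps with
  | nil => intro t a b; simp
  | cons p ps ih =>
    intro t a b
    obtain ⟨hne, hsh⟩ := hps p (by simp)
    have hps' : ∀ q ∈ ps, pvGood q := fun q hq => hps q (by simp [hq])
    obtain ⟨c, p', rfl⟩ : ∃ c p', p = c :: p' := by
      cases p with
      | nil => exact absurd rfl hne
      | cons c p' => exact ⟨c, p', rfl⟩
    rw [List.flatten_cons, List.foldl_append]
    rcases hsh with hws | hword
    · have hc : pvIsWS c = true := hws c (by simp)
      by_cases hb : b = 0
      · subst hb
        rw [pv_foldlA_ws_zero c p' hws t a]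
        simp only [List.foldl_cons, pvStepB, List.headD_cons, hc, if_true]
        by_cases ha : a = []
        · simp [ha, ih hps']
        · simp [ha, ih hps']
      · rw [pv_foldlA_ws_ne (c :: p') hws t a b hb]
        simp only [List.foldl_cons, pvStepB, List.headD_cons, hc, if_true, if_neg hb]
        exact ih hps' t (a ++ (c :: p')) b
    · rw [pv_foldlA_word (c :: p') hword t a b]
      have hc : pvIsWS c = false := hword c (by simp)
      simp only [List.foldl_cons, pvStepB, List.headD_cons, hc, Bool.false_eq_true, if_false]
      exact ih hps' t (a ++ (c :: p')) (b + pvCountBal (c :: p'))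

-- ===== VERDICT (by name: the statement is the Claim_ definition above) =====
theorem tokenize_spice_line_py_spec : Claim_equal_tokenize_spice_line_py := by
  intro line _
  unfold Spec_tokenize_spice_line_py tokenize_spice_line_py tokenize_spice_line_py_alt
  rw [← pv_splitWS_flatten line.toList,
      pv_fold_eq (pvSplitWS line.toList) (pv_splitWS_good line.toList),
      pv_splitWS_flatten line.toList]
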